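-- pv_equiv track=rewrite | github.com/noahostle/SPEAR | Attacks/full_key_recovery/ladder/ladder.py | compute_raw_next_signature
-- ===== SOURCE A (Python) =====
-- from typing import Dict, List, Optional, Sequence, Tuple
--
-- def canonical_shift_tuple(values: Sequence[int], modulus: int) -> Tuple[int, ...]:
--     unique = sorted({int(value) % modulus for value in values})
--     if not unique:
--         return ()
--     best: Optional[Tuple[int, ...]] = None
--     for base in unique:
--         candidate = tuple(sorted(((value - base) % modulus) for value in unique))
--         if best is None or candidate < best:
--             best = candidate
--     assert best is not None
--     return best
--
-- def compute_raw_next_signature(table: Sequence[int]) -> Dict[str, object]: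
--     rows = [table[(row << 8):((row + 1) << 8)] for row in range(0x100)]
--     upper_supports: List[Tuple[int, ...]] = []
--     upper_canonical: List[Tuple[int, ...]] = []
--     low_supports: List[Tuple[int, ...]] = []
--     low_canonical: List[Tuple[int, ...]] = []
--     for row in rows:
--         support = tuple(sorted({(int(value) >> 8) & 0xFF for value in row}))
--         upper_supports.append(support)
--         upper_canonical.append(canonical_shift_tuple(support, 0x100))
--         low_nibbles = tuple(sorted({value & 0x0F for value in support}))
--         low_supports.append(low_nibbles)
--         low_canonical.append(canonical_shift_tuple(low_nibbles, 0x10))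
--     upper_supports.sort()
--     upper_canonical.sort()
--     low_supports.sort()
--     low_canonical.sort()
--     return {
--         "upper_support_multiset": upper_supports,
--         "upper_canonical_multiset": upper_canonical,
--         "low_nibble_support_multiset": low_supports,
--         "low_nibble_canonical_multiset": low_canonical,
--     }
-- ===== SOURCE B (Python) =====
-- from typing import Dict, List, Optional, Sequence, Tuple
--
--
-- def _support(values: Sequence[int], shift: int, m: int) -> List[int]:
--     # presence table instead of set()+sorted(): the result comes out sorted for free
--     seen = [False] * m
--     for v in values:
--         seen[(int(v) >> shift) & (m - 1)] = True
--     return [x for x in range(m) if seen[x]]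
--
--
-- def _canon(u: Sequence[int], m: int) -> Tuple[int, ...]:
--     # u is sorted and distinct with 0 <= x < m, so the candidate for base u[i]
--     # is simply u rotated to start at i and re-based (no inner sort), and only
--     # bases sitting after a minimal cyclic gap can start the minimal candidate.
--     n = len(u)
--     if n == 0:
--         return ()
--     if n == 1:
--         return (0,)
--     gaps = [u[i + 1] - u[i] for i in range(n - 1)]
--     gaps.append(u[0] + m - u[n - 1])
--     g = min(gaps)
--     best: Optional[Tuple[int, ...]] = None
--     for i in range(n):
--         if gaps[i] == g:
--             b = u[i]
--             cand = tuple(x - b for x in u[i:]) + tuple(x - b + m for x in u[:i])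
--             if best is None or cand < best:
--                 best = cand
--     return best
--
--
-- def compute_raw_next_signature(table: Sequence[int]) -> Dict[str, object]:
--     uppers = [_support(table[(r << 8):((r + 1) << 8)], 8, 0x100) for r in range(0x100)]
--     lows = [_support(u, 0, 0x10) for u in uppers]
--     return {
--         "upper_support_multiset": sorted(tuple(u) for u in uppers),
--         "upper_canonical_multiset": sorted(_canon(u, 0x100) for u in uppers),
--         "low_nibble_support_multiset": sorted(tuple(u) for u in lows),
--         "low_nibble_canonical_multiset": sorted(_canon(u, 0x10) for u in lows),
--     }
-- ===== Notes on version B (the rewrite author's own statement) =====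
-- stated objective: alternative
-- what changed: B builds each row support with a boolean presence table instead of set()+sorted(), and replaces the canonical-shift search's per-base inner sort by rotating the already-sorted support, trying only bases that follow a minimal cyclic gap.
import Mathlib
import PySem

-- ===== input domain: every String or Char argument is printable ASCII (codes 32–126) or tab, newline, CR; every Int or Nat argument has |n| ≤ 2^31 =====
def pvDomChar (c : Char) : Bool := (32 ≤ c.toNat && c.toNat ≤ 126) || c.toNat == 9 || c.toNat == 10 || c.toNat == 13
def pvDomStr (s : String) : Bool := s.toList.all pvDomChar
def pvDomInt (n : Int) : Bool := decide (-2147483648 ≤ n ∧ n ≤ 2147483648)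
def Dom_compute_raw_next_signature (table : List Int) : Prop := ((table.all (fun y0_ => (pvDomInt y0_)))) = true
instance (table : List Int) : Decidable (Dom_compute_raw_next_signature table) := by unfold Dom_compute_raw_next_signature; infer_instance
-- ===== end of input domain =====

-- B replaces the per-base sort inside the canonical-shift search by a rotation of the
-- already-sorted support (pruned to bases after a minimal cyclic gap) and builds each
-- row support with a presence table instead of set()+sorted(); objective: alternative.

-- ===== PORT A =====
-- canonical_shift_tuple: loop over bases, candidate = sorted shifted residues
def canonicalShiftTuple (values : List Int) (modulus : Int) : List Int :=
  let unique := PySem.List.sorted (PySem.Set.ofList (values.map (fun v => PySem.Int.mod v modulus))) (fun x => x)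
  if unique = [] then []
  else
    -- `best is None` check first, then `candidate < best`; the final assert cannot
    -- fire on a nonempty `unique`, `.getD []` just unwraps the Option
    (unique.foldl
      (fun (best : Option (List Int)) base =>
        let candidate := PySem.List.sorted (unique.map (fun v => PySem.Int.mod (v - base) modulus)) (fun x => x)
        match best with
        | none => some candidate
        | some b => if candidate < b then some candidate else some b)
      none).getD []

-- row << 8 is row * 2^8 and value >> 8 is floor division by 2^8 (exact, also for negatives)
def compute_raw_next_signature (table : List Int) : List (String × List (List Int)) :=
  let rows := (PySem.List.pyRange 0 256).map (fun row => PySem.List.slice table (some (row * 256)) (some ((row + 1) * 256)))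
  let st := rows.foldl
    (fun (st : List (List Int) × List (List Int) × List (List Int) × List (List Int)) row =>
      let support := PySem.List.sorted (PySem.Set.ofList (row.map (fun v => PySem.Int.band (PySem.Int.floordiv v 256) 255))) (fun x => x)
      let low := PySem.List.sorted (PySem.Set.ofList (support.map (fun v => PySem.Int.band v 15))) (fun x => x)
      (st.1 ++ [support], st.2.1 ++ [canonicalShiftTuple support 256],
       st.2.2.1 ++ [low], st.2.2.2 ++ [canonicalShiftTuple low 16]))
    ([], [], [], [])
  [("upper_support_multiset", PySem.List.sorted st.1 (fun x => x)),
   ("upper_canonical_multiset", PySem.List.sorted st.2.1 (fun x => x)),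
   ("low_nibble_support_multiset", PySem.List.sorted st.2.2.1 (fun x => x)),
   ("low_nibble_canonical_multiset", PySem.List.sorted st.2.2.2 (fun x => x))]

-- ===== PORT B =====
-- _support: presence table, then read off the set bits in index order (v >> shift is
-- floor division by 2^shift, exact; indices are always in range, pySetD/pyGetD total forms)
def pvSupportB (values : List Int) (shift : Nat) (m : Nat) : List Int :=
  let seen := values.foldl
    (fun seen v => PySem.List.pySetD seen (PySem.Int.band (PySem.Int.floordiv v ((2:Int) ^ shift)) ((m : Int) - 1)) true)
    (List.replicate m false)
  (PySem.List.pyRange 0 (m : Int)).filter (fun x => PySem.List.pyGetD seen x false)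

-- _canon: candidates are rotations of the sorted distinct u, only at minimal-gap bases
def pvCanonB (u : List Int) (m : Int) : List Int :=
  let n := u.length
  if n = 0 then []
  else if n = 1 then [0]
  else
    let gaps := ((PySem.List.pyRange 0 ((n : Int) - 1)).map
                  (fun i => PySem.List.pyGetD u (i + 1) 0 - PySem.List.pyGetD u i 0))
                ++ [PySem.List.pyGetD u 0 0 + m - PySem.List.pyGetD u ((n : Int) - 1) 0]
    let g := (PySem.List.min? gaps (fun x => x)).getD 0   -- min(gaps); gaps is nonempty here
    ((PySem.List.pyRange 0 (n : Int)).foldl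
      (fun (best : Option (List Int)) i =>
        if PySem.List.pyGetD gaps i 0 = g then
          let b := PySem.List.pyGetD u i 0
          let cand := (PySem.List.slice u (some i) none).map (fun x => x - b)
                      ++ (PySem.List.slice u none (some i)).map (fun x => x - b + m)
          match best with
          | none => some cand
          | some bst => if cand < bst then some cand else some bst
        else best)
      none).getD []

def compute_raw_next_signature_alt (table : List Int) : List (String × List (List Int)) :=
  let uppers := (PySem.List.pyRange 0 256).map
    (fun r => pvSupportB (PySem.List.slice table (some (r * 256)) (some ((r + 1) * 256))) 8 256)
  let lows := uppers.map (fun u => pvSupportB u 0 16)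
  [("upper_support_multiset", PySem.List.sorted uppers (fun x => x)),
   ("upper_canonical_multiset", PySem.List.sorted (uppers.map (fun u => pvCanonB u 256)) (fun x => x)),
   ("low_nibble_support_multiset", PySem.List.sorted lows (fun x => x)),
   ("low_nibble_canonical_multiset", PySem.List.sorted (lows.map (fun u => pvCanonB u 16)) (fun x => x))]

-- ===== PRECONDITION & SPEC =====
def Spec_compute_raw_next_signature (table : List Int) (out : List (String × List (List Int))) : Prop := out = compute_raw_next_signature_alt table
instance (table : List Int) (out : List (String × List (List Int))) : Decidable (Spec_compute_raw_next_signature table out) := by unfold Spec_compute_raw_next_signature; infer_instance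

-- ===== CLAIM (what is proved, stated in full; the proofs are below) =====
def Claim_equal_compute_raw_next_signature : Prop := ∀ (table : List Int), Dom_compute_raw_next_signature table → Spec_compute_raw_next_signature table (compute_raw_next_signature table)

-- ===== LEMMAS AND PROOFS =====

-- the min-accumulating step of both canonical searches, and generic facts about it
def pvOpt (best : Option (List Int)) (cand : List Int) : Option (List Int) :=
  match best with
  | none => some cand
  | some b => if cand < b then some cand else some b

lemma foldl_pvOpt_some (cs : List (List Int)) (c : List Int) :
    cs.foldl pvOpt (some c) = some (cs.foldl min c) := by
  induction cs generalizing c with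
  | nil => rfl
  | cons x xs ih =>
      simp only [List.foldl_cons]
      have h1 : pvOpt (some c) x = some (min c x) := by
        simp only [pvOpt]
        split_ifs with h
        · exact congrArg some (min_eq_right h.le).symm
        · exact congrArg some (min_eq_left (not_lt.mp h)).symm
      rw [h1, ih]

lemma foldl_pvOpt_none (c : List Int) (cs : List (List Int)) :
    (c :: cs).foldl pvOpt none = some (cs.foldl min c) := by
  simp only [List.foldl_cons]
  exact foldl_pvOpt_some cs c

lemma foldl_min_mem (cs : List (List Int)) (c : List Int) : cs.foldl min c ∈ c :: cs := by
  induction cs generalizing c with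
  | nil => simp
  | cons x xs ih =>
      simp only [List.foldl_cons]
      rcases List.mem_cons.mp (ih (min c x)) with h | h
      · rcases min_cases c x with ⟨he, _⟩ | ⟨he, _⟩
        · exact List.mem_cons.mpr (Or.inl (h.trans he))
        · exact List.mem_cons.mpr (Or.inr (List.mem_cons.mpr (Or.inl (h.trans he))))
      · exact List.mem_cons.mpr (Or.inr (List.mem_cons.mpr (Or.inr h)))

lemma foldl_min_le_self (cs : List (List Int)) (c : List Int) : cs.foldl min c ≤ c := by
  induction cs generalizing c with
  | nil => simp
  | cons x xs ih => exact le_trans (ih (min c x)) (min_le_left _ _)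

lemma foldl_min_le (cs : List (List Int)) (c x : List Int) (hx : x ∈ c :: cs) :
    cs.foldl min c ≤ x := by
  induction cs generalizing c with
  | nil =>
      simp only [List.mem_singleton] at hx
      simp [hx]
  | cons y ys ih =>
      simp only [List.foldl_cons]
      rcases List.mem_cons.mp hx with h | h
      · subst h
        exact le_trans (foldl_min_le_self ys (min x y)) (min_le_left _ _)
      · rcases List.mem_cons.mp h with h' | h'
        · subst h'
          exact le_trans (foldl_min_le_self ys (min c x)) (min_le_right _ _)
        · exact ih (min c y) (List.mem_cons.mpr (Or.inr h'))

-- dropping only elements strictly above some kept element does not change the minimum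
lemma foldl_pvOpt_filter (cs : List (List Int)) (p : List Int → Bool)
    (hne : cs.filter p ≠ [])
    (h : ∀ x ∈ cs, p x = true → ∀ y ∈ cs, ¬ p y = true → x < y) :
    (cs.filter p).foldl pvOpt none = cs.foldl pvOpt none := by
  obtain ⟨k, ks, hk⟩ := List.exists_cons_of_ne_nil hne
  have hcs : cs ≠ [] := by
    intro hnil; rw [hnil] at hk; simp at hk
  obtain ⟨c, cs', hc⟩ := List.exists_cons_of_ne_nil hcs
  subst hc
  rw [hk, foldl_pvOpt_none, foldl_pvOpt_none]
  congr 1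
  set M1 := ks.foldl min k with hM1
  set M2 := cs'.foldl min c with hM2
  have hM1mem : M1 ∈ (c :: cs').filter p := by
    rw [hk]; exact foldl_min_mem ks k
  have hM1cs : M1 ∈ c :: cs' := List.mem_of_mem_filter hM1mem
  have hM1p : p M1 = true := List.of_mem_filter hM1mem
  have hM2mem : M2 ∈ c :: cs' := foldl_min_mem cs' c
  have h21 : M2 ≤ M1 := foldl_min_le cs' c M1 hM1cs
  by_cases hp : p M2 = true
  · have : M1 ≤ M2 := by
      apply foldl_min_le ks k
      rw [← hk]
      exact List.mem_filter.mpr ⟨hM2mem, hp⟩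
    exact le_antisymm this h21
  · exact absurd (h M1 hM1cs hM1p M2 hM2mem hp) (not_lt.mpr h21)

-- bounds of Python's a & b for a nonnegative mask b
lemma band_bounds (a b : Int) (hb : 0 ≤ b) :
    0 ≤ PySem.Int.band a b ∧ PySem.Int.band a b ≤ b := by
  unfold PySem.Int.band
  split_ifs with h1
  · have := Nat.and_le_right (n := a.toNat) (m := b.toNat)
    omega
  · have : b.toNat - (b.toNat &&& (-a - 1).toNat) ≤ b.toNat := Nat.sub_le _ _
    omega

-- the presence table of B reads back exactly membership in the written values
lemma seen_spec (f : Int → Int) (m : Nat) (hf : ∀ v, 0 ≤ f v ∧ f v < (m : Int))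
    (values : List Int) (s : List Bool) (hs : s.length = m) (x : Int)
    (hx0 : 0 ≤ x) (hxm : x < (m : Int)) :
    (PySem.List.pyGetD (values.foldl (fun s v => PySem.List.pySetD s (f v) true) s) x false = true
      ↔ (x ∈ values.map f ∨ PySem.List.pyGetD s x false = true)) := by
  induction values generalizing s with
  | nil => simp
  | cons v vs ih =>
      simp only [List.foldl_cons, List.map_cons, List.mem_cons]
      have hlen : (PySem.List.pySetD s (f v) true).length = m := by
        rw [PySem.List.length_pySetD, hs]
      rw [ih (PySem.List.pySetD s (f v) true) hlen]
      have hfv := hf v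
      have hset : PySem.List.pySetD s (f v) true = s.set (f v).toNat true :=
        PySem.List.pySetD_of_nonneg s true hfv.1
      have hget1 : PySem.List.pyGetD (s.set (f v).toNat true) x false
          = if x.toNat = (f v).toNat then true else PySem.List.pyGetD s x false := by
        rw [PySem.List.pyGetD_eq_getElem (s.set (f v).toNat true) false (by omega)
              (by simp only [List.length_set]; omega),
            PySem.List.pyGetD_eq_getElem s false (by omega) (by omega)]
        rw [List.getElem_set]
        split_ifs with h1 h2 h3 <;> try rfl
        · exact absurd h1.symm h2
        · exact absurd h3.symm h1
      rw [hset, hget1]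
      constructor
      · rintro (h | h)
        · exact Or.inl (Or.inr h)
        · split_ifs at h with he
          · exact Or.inl (Or.inl (by omega))
          · exact Or.inr h
      · rintro (⟨h | h⟩ | h)
        · right
          rw [if_pos (by omega)]
        · exact Or.inl h
        · right
          split_ifs <;> simp [h]


-- B's support = A's sorted set-of-mapped-values, for any index map into [0, m)
lemma support_eq (f : Int → Int) (m : Nat)
    (hf : ∀ v, 0 ≤ f v ∧ f v < (m : Int)) (values : List Int) :
    (PySem.List.pyRange 0 (m : Int)).filter
        (fun x => PySem.List.pyGetD (values.foldl (fun s v => PySem.List.pySetD s (f v) true) (List.replicate m false)) x false)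
      = PySem.List.sorted (PySem.Set.ofList (values.map f)) (fun x => x) := by
  symm
  apply PySem.List.sorted_eq_of_perm_of_pairwise_lt
  · -- Perm
    apply (List.perm_ext_iff_of_nodup ?nd1 ?nd2).mpr
    case nd1 =>
      exact List.Nodup.sublist List.filter_sublist (PySem.List.nodup_pyRange_one 0 (m : Int))
    case nd2 => exact PySem.Set.nodup_ofList _
    · intro a
      rw [List.mem_filter, PySem.Set.mem_ofList, PySem.List.mem_pyRange_one]
      constructor
      · rintro ⟨⟨h0, hm'⟩, hp⟩
        have hrep : PySem.List.pyGetD (List.replicate m false) a false = false := by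
          rw [PySem.List.pyGetD_eq_getElem _ false h0 (by simp; omega)]
          simp
        have := (seen_spec f m hf values (List.replicate m false) (by simp) a h0 hm').mp hp
        rcases this with h | h
        · exact h
        · rw [hrep] at h; exact absurd h (by simp)
      · intro ha
        obtain ⟨v, hv, rfl⟩ := List.mem_map.mp ha
        have hfv := hf v
        refine ⟨⟨hfv.1, hfv.2⟩, ?_⟩
        exact (seen_spec f m hf values (List.replicate m false) (by simp) (f v) hfv.1 hfv.2).mpr (Or.inl ha)
  · -- Pairwise <
    exact (PySem.List.pairwise_lt_pyRange_one 0 (m : Int)).sublist List.filter_sublist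

-- A's re-normalisation of an already sorted, distinct, bounded list is the identity
lemma unique_eq (u : List Int) (m : Int) (hm : 0 < m) (hs : u.Pairwise (· < ·))
    (hb : ∀ x ∈ u, 0 ≤ x ∧ x < m) :
    PySem.List.sorted (PySem.Set.ofList (u.map (fun v => PySem.Int.mod v m))) (fun x => x) = u := by
  have hmap : u.map (fun v => PySem.Int.mod v m) = u := by
    rw [List.map_congr_left (g := id), List.map_id]
    intro x hx
    have := hb x hx
    rw [PySem.Int.mod_eq_emod_of_pos hm]
    simp only [id]
    exact Int.emod_eq_of_lt this.1 this.2
  rw [hmap, PySem.Set.ofList_eq_self_of_nodup _ (hs.imp ne_of_lt)]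
  exact PySem.List.sorted_eq_self_of_pairwise u _ (hs.imp le_of_lt)

-- B's rotation candidate at index i
def candAt (u : List Int) (m : Int) (i : Nat) : List Int :=
  (u.drop i).map (fun x => x - u.getD i 0) ++ (u.take i).map (fun x => x - u.getD i 0 + m)

-- the cyclic gap after index i
def gapAt (u : List Int) (m : Int) (i : Nat) : Int :=
  if i + 1 < u.length then u.getD (i + 1) 0 - u.getD i 0 else u.getD 0 0 + m - u.getD i 0

-- A's sorted shifted-residue candidate is B's rotation candidate
lemma cand_sorted_eq (u : List Int) (m : Int) (hs : u.Pairwise (· < ·))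
    (hb : ∀ x ∈ u, 0 ≤ x ∧ x < m) (i : Nat) (hi : i < u.length) :
    PySem.List.sorted (u.map (fun v => PySem.Int.mod (v - u.getD i 0) m)) (fun x => x) = candAt u m i := by
  set b := u.getD i 0 with hbdef
  have hbmem : b ∈ u := by
    rw [hbdef, List.getD_eq_getElem u 0 hi]
    exact List.getElem_mem hi
  have hbb := hb b hbmem
  have hm : 0 < m := by omega
  -- everything in the dropped part is ≥ b, in the taken part < b
  have htd : ∀ x ∈ u.take i, ∀ y ∈ u.drop i, x < y := by
    have h' : (u.take i ++ u.drop i).Pairwise (· < ·) := by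
      rw [List.take_append_drop i u]; exact hs
    exact (List.pairwise_append.mp h').2.2
  have hdropc : u.drop i = b :: u.drop (i + 1) := by
    rw [hbdef, List.getD_eq_getElem u 0 hi]
    exact List.drop_eq_getElem_cons hi
  have hdge : ∀ y ∈ u.drop i, b ≤ y := by
    intro y hy
    rw [hdropc] at hy
    rcases List.mem_cons.mp hy with h | h
    · omega
    · have : ∀ z ∈ u.drop (i+1), b < z := by
        have hp : (u.drop i).Pairwise (· < ·) := hs.sublist (List.drop_sublist _ _)
        rw [hdropc] at hp
        exact (List.pairwise_cons.mp hp).1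
      exact (this y h).le
  have htlt : ∀ x ∈ u.take i, x < b := by
    intro x hx
    exact htd x hx b (by rw [hdropc]; exact List.mem_cons_self ..)
  -- candAt = the whole rotation mapped through the residue function
  have hmap1 : (u.drop i).map (fun x => x - b) = (u.drop i).map (fun v => PySem.Int.mod (v - b) m) := by
    apply List.map_congr_left
    intro x hx
    have hxu := hb x (List.mem_of_mem_drop hx)
    have := hdge x hx
    rw [PySem.Int.mod_eq_emod_of_pos hm, Int.emod_eq_of_lt (by omega) (by omega)]
  have hmap2 : (u.take i).map (fun x => x - b + m) = (u.take i).map (fun v => PySem.Int.mod (v - b) m) := by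
    apply List.map_congr_left
    intro x hx
    have hxu := hb x (List.mem_of_mem_take hx)
    have := htlt x hx
    rw [PySem.Int.mod_eq_emod_of_pos hm]
    have : (x - b) % m = (x - b + m) % m := by
      conv_lhs => rw [show x - b = (x - b + m) + m * (-1) by ring]
      rw [Int.add_mul_emod_self_left]
    rw [this, Int.emod_eq_of_lt (by omega) (by omega)]
  apply PySem.List.sorted_eq_of_perm_of_pairwise_lt
  · -- permutation
    unfold candAt
    rw [← hbdef, hmap1, hmap2, ← List.map_append]
    apply List.Perm.map
    have he : u.take i ++ u.drop i = u := List.take_append_drop i u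
    have h2 : (u.take i ++ u.drop i).Perm u := by rw [he]
    exact List.perm_append_comm.trans h2
  · -- strictly increasing
    unfold candAt
    rw [← hbdef]
    apply List.pairwise_append.mpr
    refine ⟨?_, ?_, ?_⟩
    · exact List.Pairwise.map _ (fun a c h => by omega) (hs.sublist (List.drop_sublist _ _))
    · exact List.Pairwise.map _ (fun a c h => by omega) (hs.sublist (List.take_sublist _ _))
    · intro x hx y hy
      obtain ⟨x', hx', rfl⟩ := List.mem_map.mp hx
      obtain ⟨y', hy', rfl⟩ := List.mem_map.mp hy
      have h1 := hb x' (List.mem_of_mem_drop hx')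
      have h2 := hb y' (List.mem_of_mem_take hy')
      omega

-- the first two entries of a rotation candidate (n ≥ 2): 0, then the gap at its base
lemma candAt_head (u : List Int) (m : Int) (i : Nat) (hi : i < u.length) (h2 : 2 ≤ u.length) :
    ∃ t, candAt u m i = 0 :: gapAt u m i :: t := by
  unfold candAt gapAt
  have hdropc : u.drop i = u.getD i 0 :: u.drop (i + 1) := by
    rw [List.getD_eq_getElem u 0 hi]
    exact List.drop_eq_getElem_cons hi
  by_cases hlast : i + 1 < u.length
  · have hdropc2 : u.drop (i + 1) = u.getD (i + 1) 0 :: u.drop (i + 2) := by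
      rw [List.getD_eq_getElem u 0 hlast]
      exact List.drop_eq_getElem_cons hlast
    rw [hdropc, hdropc2, if_pos hlast]
    exact ⟨(u.drop (i+2)).map (fun x => x - u.getD i 0) ++ (u.take i).map (fun x => x - u.getD i 0 + m),
      by simp [sub_self]⟩
  · -- i = length - 1 : the taken part is nonempty and starts at u[0]
    have hieq : i = u.length - 1 := by omega
    have hd2 : u.drop (i + 1) = [] := List.drop_eq_nil_of_le (by omega)
    have htake : u.take i = u.getD 0 0 :: (u.take i).drop 1 := by
      have h1 : (u.take i).length = i := by rw [List.length_take]; omega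
      have hne : u.take i ≠ [] := by
        intro h; rw [h] at h1; simp at h1; omega
      obtain ⟨a, t, hat⟩ := List.exists_cons_of_ne_nil hne
      have ha : a = u.getD 0 0 := by
        have : (u.take i).getD 0 0 = u.getD 0 0 := by
          rw [List.getD_eq_getElem (u.take i) 0 (by omega), List.getD_eq_getElem u 0 (by omega)]
          simp [List.getElem_take]
        rw [hat] at this
        simpa using this
      rw [hat, ha]
      simp
    rw [hdropc, hd2, if_neg hlast, htake]
    exact ⟨((u.take i).drop 1).map (fun x => x - u.getD i 0 + m), by simp [sub_self]; ring⟩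

-- both canonical loops as pvOpt-folds over explicit candidate lists
lemma foldl_opt_eq (l : List Int) (c : Int → List Int) :
    l.foldl (fun best base =>
        match best with
        | none => some (c base)
        | some b => if c base < b then some (c base) else some b) none
      = (l.map c).foldl pvOpt none := by
  rw [List.foldl_map]
  rfl

lemma foldl_guard2 (l : List Int) (q : Int → Prop) [DecidablePred q] (c : Int → List Int) :
    l.foldl (fun best i =>
        if q i then
          match best with
          | none => some (c i)
          | some bst => if c i < bst then some (c i) else some bst
        else best) none
      = ((l.filter (fun i => decide (q i))).map c).foldl pvOpt none := by
  have main : ∀ (init : Option (List Int)),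
      l.foldl (fun best i =>
        if q i then
          match best with
          | none => some (c i)
          | some bst => if c i < bst then some (c i) else some bst
        else best) init
      = ((l.filter (fun i => decide (q i))).map c).foldl pvOpt init := by
    induction l with
    | nil => intro init; rfl
    | cons x xs ih =>
        intro init
        by_cases hq : q x
        · simp only [List.foldl_cons, List.filter_cons, hq, decide_true, if_pos, List.map_cons]
          rw [ih]
          rfl
        · simp only [List.foldl_cons, List.filter_cons, hq, decide_false, Bool.false_eq_true,
            ite_false]
          rw [ih]
  exact main none

lemma map_eq_map_range {α β : Type} (l : List α) (c : α → β) (d : α) :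
    l.map c = (PySem.List.pyRange 0 (PySem.List.len l)).map (fun j => c (PySem.List.pyGetD l j d)) := by
  conv_rhs => rw [show (fun j => c (PySem.List.pyGetD l j d)) = c ∘ (fun j => PySem.List.pyGetD l j d) from rfl]
  rw [← List.map_map, PySem.List.map_pyGetD_pyRange_zero]

-- the main canonical-search equality
lemma canon_eq (u : List Int) (m : Int) (hm : 0 < m) (hs : u.Pairwise (· < ·))
    (hb : ∀ x ∈ u, 0 ≤ x ∧ x < m) :
    canonicalShiftTuple u m = pvCanonB u m := by
  simp only [canonicalShiftTuple, pvCanonB]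
  rw [unique_eq u m hm hs hb]
  by_cases hn0 : u.length = 0
  · obtain rfl := List.length_eq_zero_iff.mp hn0
    simp
  by_cases hn1 : u.length = 1
  · obtain ⟨a, rfl⟩ := List.length_eq_one_iff.mp hn1
    rw [if_neg (by simp), if_neg hn0, if_pos hn1]
    simp only [List.foldl_cons, List.foldl_nil]
    have hc := cand_sorted_eq [a] m hs hb 0 (by simp)
    simp only [List.getD_cons_zero] at hc
    simp only [hc]
    simp [candAt]
  · -- n ≥ 2
    have h2 : 2 ≤ u.length := by omega
    have hne : u ≠ [] := by intro h; rw [h] at hn0; simp at hn0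
    rw [if_neg hne, if_neg hn0, if_neg hn1]
    rw [foldl_opt_eq u (fun base => PySem.List.sorted (u.map (fun v => PySem.Int.mod (v - base) m)) (fun x => x))]
    rw [foldl_guard2 (PySem.List.pyRange 0 (u.length : Int))
          (fun i => PySem.List.pyGetD
            (((PySem.List.pyRange 0 ((u.length : Int) - 1)).map
                  (fun i => PySem.List.pyGetD u (i + 1) 0 - PySem.List.pyGetD u i 0))
                ++ [PySem.List.pyGetD u 0 0 + m - PySem.List.pyGetD u ((u.length : Int) - 1) 0]) i 0
            = (PySem.List.min? (((PySem.List.pyRange 0 ((u.length : Int) - 1)).map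
                  (fun i => PySem.List.pyGetD u (i + 1) 0 - PySem.List.pyGetD u i 0))
                ++ [PySem.List.pyGetD u 0 0 + m - PySem.List.pyGetD u ((u.length : Int) - 1) 0]) (fun x => x)).getD 0)
          (fun i => (PySem.List.slice u (some i) none).map (fun x => x - PySem.List.pyGetD u i 0)
                      ++ (PySem.List.slice u none (some i)).map (fun x => x - PySem.List.pyGetD u i 0 + m))]
    set G := ((PySem.List.pyRange 0 ((u.length : Int) - 1)).map
                  (fun i => PySem.List.pyGetD u (i + 1) 0 - PySem.List.pyGetD u i 0))
                ++ [PySem.List.pyGetD u 0 0 + m - PySem.List.pyGetD u ((u.length : Int) - 1) 0] with hGdef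
    set g := (PySem.List.min? G (fun x => x)).getD 0 with hgdef
    have hGlen : G.length = u.length := by
      rw [hGdef]
      simp [PySem.List.length_pyRange_one]
      omega
    have hGget : ∀ j : Nat, j < u.length → G.getD j 0 = gapAt u m j := by
      intro j hj
      by_cases hj1 : j + 1 < u.length
      · have hjl : j < ((PySem.List.pyRange 0 ((u.length : Int) - 1)).map
            (fun i => PySem.List.pyGetD u (i + 1) 0 - PySem.List.pyGetD u i 0)).length := by
          simp [PySem.List.length_pyRange_one]; omega
        rw [hGdef, List.getD_eq_getElem _ _ (by simp [PySem.List.length_pyRange_one]; omega),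
            List.getElem_append_left hjl, List.getElem_map, PySem.List.getElem_pyRange_one]
        have h1 : (0 : Int) + (j : Int) + 1 = ((j + 1 : Nat) : Int) := by push_cast; ring
        have h2 : (0 : Int) + (j : Int) = ((j : Nat) : Int) := by omega
        rw [h1, h2, PySem.List.pyGetD_natCast, PySem.List.pyGetD_natCast]
        rw [gapAt, if_pos hj1]
      · have hj2 : j = u.length - 1 := by omega
        have hll : ((PySem.List.pyRange 0 ((u.length : Int) - 1)).map
            (fun i => PySem.List.pyGetD u (i + 1) 0 - PySem.List.pyGetD u i 0)).length = u.length - 1 := by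
          simp [PySem.List.length_pyRange_one]
        rw [hGdef, List.getD_eq_getElem _ _ (by simp [PySem.List.length_pyRange_one]; omega),
            List.getElem_append_right (by rw [hll]; omega)]
        simp only [hll]
        rw [List.getElem_singleton]
        have h3 : ((u.length : Int) - 1) = ((u.length - 1 : Nat) : Int) := by omega
        rw [h3, PySem.List.pyGetD_natCast, PySem.List.pyGetD_zero]
        rw [gapAt, if_neg hj1, hj2]
    have hpyG : ∀ i : Int, 0 ≤ i → i < (u.length : Int) → PySem.List.pyGetD G i 0 = gapAt u m i.toNat := by
      intro i h0 h1
      rw [PySem.List.pyGetD_eq_getElem _ _ h0 (by rw [hGlen]; omega),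
          ← List.getD_eq_getElem G 0 (by rw [hGlen]; omega)]
      exact hGget i.toNat (by omega)
    -- the left map as rotation candidates
    rw [map_eq_map_range u (fun base => PySem.List.sorted (u.map (fun v => PySem.Int.mod (v - base) m)) (fun x => x)) 0]
    rw [PySem.List.len_eq]
    have hgetu : ∀ i : Int, 0 ≤ i → i < (u.length : Int) → PySem.List.pyGetD u i 0 = u.getD i.toNat 0 := by
      intro i h0 h1
      rw [PySem.List.pyGetD_eq_getElem _ _ h0 (by omega), ← List.getD_eq_getElem u 0 (by omega)]
    have hLmap : (PySem.List.pyRange 0 (u.length : Int)).map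
          (fun j => PySem.List.sorted (u.map (fun v => PySem.Int.mod (v - PySem.List.pyGetD u j 0) m)) (fun x => x))
        = (PySem.List.pyRange 0 (u.length : Int)).map (fun j => candAt u m j.toNat) := by
      apply List.map_congr_left
      intro j hj
      obtain ⟨hj0, hj1⟩ := PySem.List.mem_pyRange_one.mp hj
      rw [hgetu j hj0 hj1]
      exact cand_sorted_eq u m hs hb j.toNat (by omega)
    rw [hLmap]
    -- the right map as rotation candidates
    have hRmap : ((PySem.List.pyRange 0 (u.length : Int)).filter
            (fun i => decide (PySem.List.pyGetD G i 0 = g))).map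
          (fun i => (PySem.List.slice u (some i) none).map (fun x => x - PySem.List.pyGetD u i 0)
              ++ (PySem.List.slice u none (some i)).map (fun x => x - PySem.List.pyGetD u i 0 + m))
        = ((PySem.List.pyRange 0 (u.length : Int)).filter
            (fun i => decide (PySem.List.pyGetD G i 0 = g))).map (fun i => candAt u m i.toNat) := by
      apply List.map_congr_left
      intro i hi
      obtain ⟨hi0, hi1⟩ := PySem.List.mem_pyRange_one.mp (List.mem_of_mem_filter hi)
      rw [PySem.List.slice_from u hi0, PySem.List.slice_to u hi0, hgetu i hi0 hi1]
      rfl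
    rw [hRmap]
    -- the guard as a predicate on the candidate itself
    have hfilter : (PySem.List.pyRange 0 (u.length : Int)).filter
          (fun i => decide (PySem.List.pyGetD G i 0 = g))
        = (PySem.List.pyRange 0 (u.length : Int)).filter
          (fun i => decide ((candAt u m i.toNat).getD 1 0 = g)) := by
      apply List.filter_congr
      intro i hi
      obtain ⟨hi0, hi1⟩ := PySem.List.mem_pyRange_one.mp hi
      obtain ⟨t, ht⟩ := candAt_head u m i.toNat (by omega) h2
      rw [hpyG i hi0 hi1, ht]
      simp
    rw [hfilter]
    have hcomp : ((PySem.List.pyRange 0 (u.length : Int)).filter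
            (fun i => decide ((candAt u m i.toNat).getD 1 0 = g))).map (fun i => candAt u m i.toNat)
        = ((PySem.List.pyRange 0 (u.length : Int)).map (fun i => candAt u m i.toNat)).filter
            (fun x => decide (x.getD 1 0 = g)) := by
      rw [List.filter_map]
      rfl
    rw [hcomp]
    -- min? g facts
    obtain ⟨g0, hmin⟩ : ∃ g0, PySem.List.min? G (fun x => x) = some g0 := by
      cases hm0 : PySem.List.min? G (fun x => x) with
      | none =>
          exfalso
          have hGnil := (PySem.List.min?_eq_none_iff G (fun x => x)).mp hm0
          rw [hGnil] at hGlen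
          simp at hGlen
          omega
      | some g0 => exact ⟨g0, rfl⟩
    have hg0 : g = g0 := by rw [hgdef, hmin]; rfl
    have hg0mem : g0 ∈ G := PySem.List.min?_mem hmin
    have hg0min : ∀ y ∈ G, g0 ≤ y := by
      intro y hy
      exact PySem.List.min?_isMin hmin y hy
    obtain ⟨j0, hj0len, hj0⟩ := List.mem_iff_getElem.mp hg0mem
    rw [hGlen] at hj0len
    -- pruning: the filtered minimum is the full minimum
    rw [foldl_pvOpt_filter]
    · -- nonempty
      apply List.ne_nil_of_mem (a := candAt u m j0)
      apply List.mem_filter.mpr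
      constructor
      · exact List.mem_map.mpr ⟨(j0 : Int), PySem.List.mem_pyRange_one.mpr (by omega),
          by rw [Int.toNat_natCast]⟩
      · obtain ⟨t, ht⟩ := candAt_head u m j0 hj0len h2
        rw [ht]
        simp only [List.getD_cons_succ, List.getD_cons_zero]
        have : gapAt u m j0 = g0 := by
          rw [← hGget j0 hj0len] at *
          rw [← hj0, List.getD_eq_getElem G 0 (by rw [hGlen]; omega)]
        simp [this, hg0]
    · -- every kept candidate is strictly below every dropped one
      intro x hx hpx y hy hpy
      obtain ⟨i, hi, rfl⟩ := List.mem_map.mp hx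
      obtain ⟨j, hj, rfl⟩ := List.mem_map.mp hy
      obtain ⟨hi0, hi1⟩ := PySem.List.mem_pyRange_one.mp hi
      obtain ⟨hj0, hj1⟩ := PySem.List.mem_pyRange_one.mp hj
      obtain ⟨tx, htx⟩ := candAt_head u m i.toNat (by omega) h2
      obtain ⟨ty, hty⟩ := candAt_head u m j.toNat (by omega) h2
      rw [htx] at hpx ⊢
      rw [hty] at hpy ⊢
      simp only [List.getD_cons_succ, List.getD_cons_zero, decide_eq_true_eq] at hpx hpy
      have hymem : gapAt u m j.toNat ∈ G := by
        rw [← hGget j.toNat (by omega), List.getD_eq_getElem G 0 (by rw [hGlen]; omega)]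
        exact List.getElem_mem _
      have hglt : g0 ≤ gapAt u m j.toNat := hg0min _ hymem
      have : gapAt u m i.toNat < gapAt u m j.toNat := by
        rw [hpx, hg0] at *
        omega
      exact List.Lex.cons (List.Lex.rel this)

-- B's support helpers in A's sorted-set form
lemma suppA_eq (values : List Int) :
    pvSupportB values 8 256
      = PySem.List.sorted (PySem.Set.ofList (values.map (fun v => PySem.Int.band (PySem.Int.floordiv v 256) 255))) (fun x => x) := by
  have h1 : ((2:Int) ^ (8:Nat)) = 256 := by norm_num
  have h2 : (((256:Nat) : Int) - 1) = 255 := by norm_num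
  simp only [pvSupportB, h1, h2]
  exact support_eq _ 256 (fun v => by
    have := band_bounds (PySem.Int.floordiv v 256) 255 (by norm_num)
    constructor <;> omega) values

lemma suppB0_eq (values : List Int) :
    pvSupportB values 0 16
      = PySem.List.sorted (PySem.Set.ofList (values.map (fun v => PySem.Int.band v 15))) (fun x => x) := by
  have h1 : ((2:Int) ^ (0:Nat)) = 1 := by norm_num
  have h2 : (((16:Nat) : Int) - 1) = 15 := by norm_num
  have h3 : ∀ v : Int, PySem.Int.floordiv v 1 = v := fun v => by
    simp [PySem.Int.floordiv, Int.fdiv_one]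
  simp only [pvSupportB, h1, h2, h3]
  exact support_eq _ 16 (fun v => by
    have := band_bounds v 15 (by norm_num)
    constructor <;> omega) values

-- a sorted set of masked values is strictly increasing with entries in [0, mask]
lemma masked_bounds (values : List Int) (f : Int → Int) (mk : Int)
    (hf : ∀ v, 0 ≤ f v ∧ f v ≤ mk) :
    ∀ x ∈ PySem.List.sorted (PySem.Set.ofList (values.map f)) (fun x => x), 0 ≤ x ∧ x ≤ mk := by
  intro x hx
  rw [PySem.List.mem_sorted, PySem.Set.mem_ofList] at hx
  obtain ⟨v, _, rfl⟩ := List.mem_map.mp hx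
  exact hf v

-- A's single loop with four appends, as four maps
lemma quad_foldl {α β : Type} (L : List α) (f1 f2 f3 f4 : α → β) (a b c d : List β) :
    L.foldl (fun st r => (st.1 ++ [f1 r], st.2.1 ++ [f2 r], st.2.2.1 ++ [f3 r], st.2.2.2 ++ [f4 r]))
        (a, b, c, d)
      = (a ++ L.map f1, b ++ L.map f2, c ++ L.map f3, d ++ L.map f4) := by
  induction L generalizing a b c d with
  | nil => simp
  | cons x xs ih => simp [List.foldl_cons, ih]

-- ===== VERDICT (by name: the statement is the Claim_ definition above) =====
theorem compute_raw_next_signature_spec : Claim_equal_compute_raw_next_signature := by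
  unfold Claim_equal_compute_raw_next_signature
  intro table _
  unfold Spec_compute_raw_next_signature
  simp only [compute_raw_next_signature, compute_raw_next_signature_alt]
  rw [quad_foldl]
  simp only [List.nil_append, List.map_map, suppA_eq, suppB0_eq]
  have hbA : ∀ values : List Int, ∀ x ∈ PySem.List.sorted
      (PySem.Set.ofList (values.map (fun v => PySem.Int.band (PySem.Int.floordiv v 256) 255))) (fun x => x),
      0 ≤ x ∧ x < 256 := by
    intro values x hx
    have := masked_bounds values _ 255
      (fun v => band_bounds (PySem.Int.floordiv v 256) 255 (by norm_num)) x hx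
    omega
  have hbB : ∀ values : List Int, ∀ x ∈ PySem.List.sorted
      (PySem.Set.ofList (values.map (fun v => PySem.Int.band v 15))) (fun x => x),
      0 ≤ x ∧ x < 16 := by
    intro values x hx
    have := masked_bounds values _ 15
      (fun v => band_bounds v 15 (by norm_num)) x hx
    omega
  have hcanon256 : ∀ values : List Int,
      canonicalShiftTuple (PySem.List.sorted
        (PySem.Set.ofList (values.map (fun v => PySem.Int.band (PySem.Int.floordiv v 256) 255))) (fun x => x)) 256
      = pvCanonB (PySem.List.sorted
        (PySem.Set.ofList (values.map (fun v => PySem.Int.band (PySem.Int.floordiv v 256) 255))) (fun x => x)) 256 := by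
    intro values
    exact canon_eq _ 256 (by norm_num) (PySem.List.sorted_ofList_pairwise_lt _) (hbA values)
  have hcanon16 : ∀ values : List Int,
      canonicalShiftTuple (PySem.List.sorted
        (PySem.Set.ofList (values.map (fun v => PySem.Int.band v 15))) (fun x => x)) 16
      = pvCanonB (PySem.List.sorted
        (PySem.Set.ofList (values.map (fun v => PySem.Int.band v 15))) (fun x => x)) 16 := by
    intro values
    exact canon_eq _ 16 (by norm_num) (PySem.List.sorted_ofList_pairwise_lt _) (hbB values)
  simp only [hcanon256, hcanon16, Function.comp_def]
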